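-- pv_equiv track=rewrite | github.com/jblesam/Ingenieria-Informatica | Criptografia/PECS/2019-2020_Sem1/02 Práctica/PR2/T2019_Practica2_Skeleton.py | insertParityBit
-- ===== SOURCE A (Python) =====
-- def insertParityBit(key):
--     """
--     función para insertar los bits de paridad
--     """
--     cont = 0
--     pairedKey = ""
--
--     while (cont+1) <= len(key):
--
--         if cont % 7 == 0 and cont > 0:
--             pairedKey = pairedKey + "1" + key[cont]
--
--         else:
--             pairedKey = pairedKey + key[cont]
--
--         cont += 1
--     pairedKey = pairedKey + "1"
--
--     return pairedKey
-- ===== SOURCE B (Python) =====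
-- def insertParityBit(key):
--     """
--     función para insertar los bits de paridad
--     """
--     return "1".join(key[i:i+7] for i in range(0, len(key), 7)) + "1"
-- ===== Notes on version B (the rewrite author's own statement) =====
-- stated objective: faster
-- what changed: Replaces the per-character while loop that rebuilds the string with '+' at every step by slicing the key into chunks of 7 and joining them with the separator '1' (plus a trailing '1').
import Mathlib
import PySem

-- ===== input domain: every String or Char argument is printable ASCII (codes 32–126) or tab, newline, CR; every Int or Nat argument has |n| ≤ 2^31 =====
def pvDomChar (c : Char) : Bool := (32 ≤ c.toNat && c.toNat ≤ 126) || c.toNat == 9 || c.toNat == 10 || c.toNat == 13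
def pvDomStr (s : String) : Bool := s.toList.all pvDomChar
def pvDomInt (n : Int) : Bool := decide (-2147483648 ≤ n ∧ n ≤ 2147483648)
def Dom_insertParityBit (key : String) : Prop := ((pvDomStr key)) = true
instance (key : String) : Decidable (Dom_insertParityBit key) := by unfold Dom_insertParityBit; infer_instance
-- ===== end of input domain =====

-- B replaces A's per-character counter/modulo loop by joining chunks of 7 with "1" (more idiomatic); same output.


-- ===== PORT A =====
-- A's loop condition 'cont % 7 == 0 and cont > 0'
def pvMark (cont : Nat) : Bool := cont % 7 == 0 && decide (0 < cont)

-- A's while loop walks key character by character with counter 'cont'; key[cont] is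
-- always in range (cont < len(key) by the loop guard), so the loop is transcribed as
-- structural recursion over the remaining characters, carrying 'cont' and the accumulator.
def pvGoA (cont : Nat) (rest acc : List Char) : List Char :=
  match rest with
  | [] => acc ++ ['1']
  | c :: rs =>
      if pvMark cont then pvGoA (cont + 1) rs (acc ++ ['1', c])
      else pvGoA (cont + 1) rs (acc ++ [c])

def insertParityBit (key : String) : String :=
  String.ofList (pvGoA 0 key.toList [])

-- ===== PORT B =====
-- "1".join(key[i:i+7] for i in range(0, len(key), 7)) + "1"
def insertParityBit_alt (key : String) : String :=
  String.ofList
    (PySem.Chars.join ['1']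
        ((PySem.List.pyRange 0 (key.toList.length : Int) 7).map
          (fun i => PySem.List.slice key.toList (some i) (some (i + 7)))) ++ ['1'])

-- ===== PRECONDITION & SPEC =====
def Spec_insertParityBit (key : String) (out : String) : Prop := out = insertParityBit_alt key
instance (key : String) (out : String) : Decidable (Spec_insertParityBit key out) := by unfold Spec_insertParityBit; infer_instance

-- ===== CLAIM (what is proved, stated in full; the proofs are below) =====
def Claim_equal_insertParityBit : Prop := ∀ (key : String), Dom_insertParityBit key → Spec_insertParityBit key (insertParityBit key)

-- ===== LEMMAS AND PROOFS =====

-- the string A's loop builds, without the accumulator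
def pvInter (cont : Nat) : List Char → List Char
  | [] => []
  | c :: rs => (if pvMark cont then ['1', c] else [c]) ++ pvInter (cont + 1) rs

lemma pvGoA_eq (rest : List Char) : ∀ cont acc,
    pvGoA cont rest acc = acc ++ pvInter cont rest ++ ['1'] := by
  induction rest with
  | nil => intro cont acc; simp [pvGoA, pvInter]
  | cons c rs ih =>
      intro cont acc
      by_cases h : pvMark cont = true <;> simp [pvGoA, pvInter, h, ih]

lemma pvMark_add7 (cont : Nat) (h : 0 < cont) : pvMark (cont + 7) = pvMark cont := by
  simp [pvMark, Nat.add_mod_right, h]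

lemma pvInter_add7 (l : List Char) : ∀ cont, 0 < cont → pvInter (cont + 7) l = pvInter cont l := by
  induction l with
  | nil => intro _ _; rfl
  | cons c rs ih =>
      intro cont h
      simp only [pvInter, pvMark_add7 cont h]
      rw [show cont + 7 + 1 = cont + 1 + 7 by omega, ih (cont + 1) (by omega)]

lemma pvInter_plain (l : List Char) : ∀ cont,
    (∀ j, j < l.length → ¬((cont + j) % 7 = 0 ∧ 0 < cont + j)) → pvInter cont l = l := by
  induction l with
  | nil => intro _ _; rfl
  | cons c rs ih =>
      intro cont h
      have h0 := h 0 (by simp)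
      have hm : pvMark cont = false := by
        simp [pvMark]
        omega
      simp only [pvInter, hm, Bool.false_eq_true, if_false, List.singleton_append]
      rw [ih (cont + 1) (fun j hj => by
        have := h (j + 1) (by simpa using Nat.succ_lt_succ hj)
        omega)]

lemma pvInter_append (xs : List Char) : ∀ ys cont,
    pvInter cont (xs ++ ys) = pvInter cont xs ++ pvInter (cont + xs.length) ys := by
  induction xs with
  | nil => intro ys cont; simp [pvInter]
  | cons c rs ih =>
      intro ys cont
      simp only [List.cons_append, pvInter, ih, List.length_cons, List.append_assoc]
      rw [show cont + (rs.length + 1) = cont + 1 + rs.length by omega]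

def pvChunks (l : List Char) : List (List Char) :=
  if _h : l = [] then [] else l.take 7 :: pvChunks (l.drop 7)
  termination_by l.length
  decreasing_by
    cases l with
    | nil => exact absurd rfl _h
    | cons c rs => simp

lemma pvInter_chunk (l : List Char) (h7 : 7 < l.length) :
    pvInter 0 l = l.take 7 ++ '1' :: pvInter 0 (l.drop 7) := by
  have hsplit := pvInter_append (l.take 7) (l.drop 7) 0
  rw [List.take_append_drop] at hsplit
  have htl : (l.take 7).length = 7 := by rw [List.length_take]; omega
  have hplain : pvInter 0 (l.take 7) = l.take 7 := by
    apply pvInter_plain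
    intro j hj
    rw [htl] at hj
    omega
  rw [hsplit, htl, hplain]
  congr 1
  obtain ⟨c, rs, hd⟩ : ∃ c rs, l.drop 7 = c :: rs := by
    cases hdd : l.drop 7 with
    | nil => exfalso; have := congrArg List.length hdd; simp [List.length_drop] at this; omega
    | cons c rs => exact ⟨c, rs, rfl⟩
  rw [hd]
  have hm7 : pvMark 7 = true := by decide
  have hm0 : pvMark 0 = false := by decide
  simp only [pvInter, hm7, hm0, if_true, Bool.false_eq_true, if_false]
  rw [show (7 : Nat) + 1 = 1 + 7 by omega, pvInter_add7 rs 1 (by omega)]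
  simp

lemma pvInter_eq_join (n : Nat) : ∀ l : List Char, l.length = n →
    pvInter 0 l = PySem.Chars.join ['1'] (pvChunks l) := by
  induction n using Nat.strong_induction_on with
  | _ n ih =>
    intro l hl
    by_cases hnil : l = []
    · subst hnil; simp [pvInter, pvChunks, PySem.Chars.join_nil]
    · rw [pvChunks]; simp only [hnil, dite_false]
      by_cases h7 : l.length ≤ 7
      · have hd : l.drop 7 = [] := by rw [List.drop_eq_nil_iff]; omega
        have ht : l.take 7 = l := List.take_of_length_le h7
        rw [hd, pvChunks]
        simp only [dite_true, PySem.Chars.join_singleton, ht]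
        apply pvInter_plain
        intro j hj
        omega
      · rw [not_le] at h7
        have hdnil : l.drop 7 ≠ [] := by
          intro hc
          have := congrArg List.length hc
          simp [List.length_drop] at this
          omega
        have hch : pvChunks (l.drop 7) = (l.drop 7).take 7 :: pvChunks ((l.drop 7).drop 7) := by
          rw [pvChunks]; simp only [hdnil, dite_false]
        have hih := ih (l.drop 7).length (by simp [List.length_drop]; omega) (l.drop 7) rfl
        rw [hch, PySem.Chars.join_cons_cons, ← hch, ← hih, pvInter_chunk l h7]
        simp

-- B's mapped slices are exactly the 7-chunks
lemma pvRange_count (n : Nat) :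
    (if (0:Int) < (n:Int) then (((n:Int) - 0 + 7 - 1) / 7).toNat else 0) = (n + 6) / 7 := by
  split_ifs with h
  · have : ((n:Int) - 0 + 7 - 1) = ((n + 6 : Nat) : Int) := by push_cast; ring
    rw [this, show ((7:Int) = ((7:Nat):Int)) from rfl, ← Int.natCast_div, Int.toNat_natCast]
  · have hn : n = 0 := by omega
    simp [hn]

lemma pvChunks_range (n : Nat) : ∀ l : List Char, l.length = n →
    (List.range ((l.length + 6) / 7)).map (fun k => (l.drop (7 * k)).take 7) = pvChunks l := by
  induction n using Nat.strong_induction_on with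
  | _ n ih =>
    intro l hl
    by_cases hnil : l = []
    · subst hnil; simp [pvChunks]
    · have hpos : 0 < l.length := List.length_pos_iff.mpr hnil
      have hk : (l.length + 6) / 7 = ((l.drop 7).length + 6) / 7 + 1 := by
        simp [List.length_drop]; omega
      rw [hk, List.range_succ_eq_map, List.map_cons, List.map_map]
      rw [pvChunks]; simp only [hnil, dite_false]
      refine congrArg₂ List.cons (by simp) ?_
      have hfun : ((fun k => (l.drop (7 * k)).take 7) ∘ Nat.succ)
          = fun k => ((l.drop 7).drop (7 * k)).take 7 := by
        funext k
        simp only [Function.comp_apply, List.drop_drop]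
        congr 2
        omega
      rw [hfun]
      have hih := ih (l.drop 7).length (by simp [List.length_drop]; omega) (l.drop 7) rfl
      simpa [List.length_drop] using hih

lemma pvMap_slice (l : List Char) :
    (PySem.List.pyRange 0 (l.length : Int) 7).map
        (fun i => PySem.List.slice l (some i) (some (i + 7))) = pvChunks l := by
  rw [PySem.List.pyRange_of_pos 0 (l.length : Int) (by norm_num), pvRange_count, List.map_map]
  rw [← pvChunks_range l.length l rfl]
  apply List.map_congr_left
  intro k _
  have hs := PySem.List.slice_natCast_add l (7 * k) 7
  simp only [Function.comp]
  have hc : (0 : Int) + 7 * (k : Int) = ((7 * k : Nat) : Int) := by push_cast; ring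
  rw [hc, show ((7:Int) = ((7:Nat):Int)) from rfl, hs]

-- ===== VERDICT (by name: the statement is the Claim_ definition above) =====
theorem insertParityBit_spec : Claim_equal_insertParityBit := by
  intro key _
  unfold Spec_insertParityBit insertParityBit insertParityBit_alt
  rw [pvGoA_eq, pvMap_slice, ← pvInter_eq_join key.toList.length key.toList rfl]
  simp
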